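-- pv_equiv track=rewrite | github.com/KIT-IISM-EM/partitionstability | Python/partitionstability.py | geq
-- ===== SOURCE A (Python) =====
-- def geq(P, Q):
--     """
--     Test if ``P`` is coarser than or equal to ``Q``.
--     Both, equality and coarseness are up to label isomorphism, i.e. partitions [0, 0, 1] and [3, 3, 7] are equal.
--     A partition ``P`` is coarser than a partition ``Q`` if each cluster in ``Q`` is a subset of a cluster in ``P``.
--
--     Data representation is:
--      * Partition ``P``: array-like, i.e. ``P[i]`` corresponds to the (arbitrary) cluster id of node ``i``
--
--     Usage:
--
--     >>> from partitionstability import geq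
--     >>> P = [0,0,0,1,1,1]
--     >>> P_prime = [1,1,1,0,0,0]
--     >>> Q = [3,3,0,2,2,1]
--     >>> R = [3,3,3,3,1,1]
--     >>> assert geq(P, Q) == True
--     >>> assert geq(P, P_prime) == True
--     >>> assert geq(P, P_prime) == geq(P_prime, P)  # Cluster ids are arbitrary!
--     >>> assert geq(P, R) == False
--     >>> assert geq(R, P) == False
--     >>> S = list(range(100))
--     >>> from random import shuffle
--     >>> shuffle(S)
--     >>> assert geq(list(range(100)), S) == True
--
--     :param P: A partition in an array-like representation of node ids
--     :type P: list | tuple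
--     :param Q: A partition in an array-like representation of node ids
--     :type Q: list | tuple
--     :return: True, if P >= Q
--     :rtype: bool
--     """
--     assert len(P) == len(Q)
--     maps = {}  # Save cluster ids from Q in P. Multiple clusters in Q can map to the same cluster id in P
--
--     for i in range(len(P)):
--         if Q[i] in maps:  # The orbit id in Q was already seen
--             o_id = maps[Q[i]]
--         else:  # The first occurrence of an orbit id is saved
--             o_id = P[i]  # The orbit id in P
--             maps[Q[i]] = o_id  # The orbit id in Q maps to the one in P
--
--         if P[i] != o_id:  # The orbit ids must match
--             return False
--
--     return True
-- ===== SOURCE B (Python) =====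
-- def geq(P, Q):
--     assert len(P) == len(Q)
--     # P is coarser than Q iff pairing each node's Q-label with its P-label
--     # creates no more distinct classes than Q already has.
--     return len(set(zip(Q, P))) == len(set(Q))
-- ===== Notes on version B (the rewrite author's own statement) =====
-- stated objective: idiomatic
-- what changed: Replaces the streaming dict-building early-exit consistency loop with a one-liner comparing the number of distinct (Q-label, P-label) pairs with the number of distinct Q-labels.
import Mathlib
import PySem

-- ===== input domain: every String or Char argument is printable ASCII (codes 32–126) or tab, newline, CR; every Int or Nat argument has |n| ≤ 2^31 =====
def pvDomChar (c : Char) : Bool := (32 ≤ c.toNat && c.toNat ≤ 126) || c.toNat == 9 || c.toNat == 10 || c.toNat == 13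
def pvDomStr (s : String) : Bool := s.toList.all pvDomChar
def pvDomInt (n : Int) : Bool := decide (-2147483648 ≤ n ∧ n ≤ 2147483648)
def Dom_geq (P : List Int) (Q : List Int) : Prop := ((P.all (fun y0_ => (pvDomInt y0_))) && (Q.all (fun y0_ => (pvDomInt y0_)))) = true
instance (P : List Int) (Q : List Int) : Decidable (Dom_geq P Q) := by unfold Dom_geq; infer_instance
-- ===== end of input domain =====

-- B replaces A's streaming dict-building early-exit loop by one cardinality
-- comparison: |set(zip(Q,P))| == |set(Q)| (idiomatic; same O(n) cost).


-- ===== PORT A =====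
-- The 'for i in range(len(P))' loop reads P[i], Q[i]; under Pre_ (equal lengths,
-- guaranteed by A's assert) this is exactly a traversal of P.zip Q.
def geqLoop (maps : PySem.Dict Int Int) : List (Int × Int) → Bool
  | [] => true
  | (p, q) :: rest =>
    match maps.get? q with
    | some o =>                -- the orbit id in Q was already seen
      if p ≠ o then false else geqLoop maps rest
    | none =>                  -- first occurrence: save P[i] as its orbit id
      let o := p
      if p ≠ o then false else geqLoop (maps.insert q o) rest

def geq (P : List Int) (Q : List Int) : Bool :=
  -- assert len(P) == len(Q): on failure Python raises (outside Pre_); value here arbitrary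
  if P.length = Q.length then geqLoop PySem.Dict.empty (P.zip Q) else false

-- ===== PORT B =====
def geq_alt (P : List Int) (Q : List Int) : Bool :=
  -- assert len(P) == len(Q): on failure Python raises (outside Pre_); value here arbitrary
  if P.length = Q.length then
    decide ((PySem.Set.ofList (Q.zip P)).length = (PySem.Set.ofList Q).length)
  else false

-- ===== PRECONDITION & SPEC =====
-- Pre_ excludes unequal lengths, on which A's assert raises AssertionError.
def Pre_geq (P : List Int) (Q : List Int) : Prop := P.length = Q.length
instance (P : List Int) (Q : List Int) : Decidable (Pre_geq P Q) := by unfold Pre_geq; infer_instance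
def pvWitness_geq : List Int × List Int := ([0, 0, 1], [3, 3, 7])

def Spec_geq (P : List Int) (Q : List Int) (out : Bool) : Prop := out = geq_alt P Q
instance (P : List Int) (Q : List Int) (out : Bool) : Decidable (Spec_geq P Q out) := by unfold Spec_geq; infer_instance

-- ===== CLAIM (what is proved, stated in full; the proofs are below) =====
def Claim_equal_geq : Prop := ∀ (P : List Int) (Q : List Int), Dom_geq P Q → Pre_geq P Q → Spec_geq P Q (geq P Q)

-- ===== LEMMAS AND PROOFS =====

-- "the list of (P-label, Q-label) pairs is functional in the Q-label"
def Func (l : List (Int × Int)) : Prop :=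
  ∀ p q p', (p, q) ∈ l → (p', q) ∈ l → p = p'

-- A's loop invariant: it returns true iff every pair agrees with the map so far
-- and the remaining pairs are functional.
theorem geqLoop_eq_true_iff (l : List (Int × Int)) :
    ∀ maps : PySem.Dict Int Int,
      (geqLoop maps l = true ↔
        ((∀ p q, (p, q) ∈ l → ∀ o, maps.get? q = some o → p = o) ∧ Func l)) := by
  induction l with
  | nil =>
    intro maps
    simp [geqLoop, Func]
  | cons hd rest ih =>
    intro maps
    obtain ⟨p, q⟩ := hd
    cases hmq : maps.get? q with
    | some o =>
      have hred : geqLoop maps ((p, q) :: rest) =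
          if p ≠ o then false else geqLoop maps rest := by
        simp [geqLoop, hmq]
      rw [hred]
      by_cases hpo : p = o
      · subst hpo
        rw [if_neg (by simp), ih maps]
        constructor
        · rintro ⟨hmap, hfun⟩
          refine ⟨?_, ?_⟩
          · rintro p' q' hm o' ho'
            rcases List.mem_cons.1 hm with h | h
            · obtain ⟨h1, h2⟩ := Prod.mk.injEq .. ▸ h
              subst h1; subst h2
              rw [hmq] at ho'
              exact Option.some.inj ho'
            · exact hmap p' q' h o' ho'
          · rintro a b a' ha ha'
            rcases List.mem_cons.1 ha with h | h <;> rcases List.mem_cons.1 ha' with h' | h'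
            · rw [Prod.mk.injEq] at h h'; omega
            · obtain ⟨h1, h2⟩ := Prod.mk.injEq .. ▸ h; subst h1; subst h2
              exact (hmap a' b h' _ hmq).symm
            · obtain ⟨h1, h2⟩ := Prod.mk.injEq .. ▸ h'; subst h1; subst h2
              exact hmap a b h _ hmq
            · exact hfun a b a' h h'
        · rintro ⟨hmap, hfun⟩
          refine ⟨fun p' q' hm o' ho' => hmap p' q' (List.mem_cons_of_mem _ hm) o' ho', ?_⟩
          intro a b a' ha ha'
          exact hfun a b a' (List.mem_cons_of_mem _ ha) (List.mem_cons_of_mem _ ha')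
      · rw [if_pos hpo]
        constructor
        · intro h; exact absurd h (by simp)
        · rintro ⟨hmap, _⟩
          exact absurd (hmap p q List.mem_cons_self o hmq) hpo
    | none =>
      have hred : geqLoop maps ((p, q) :: rest) = geqLoop (maps.insert q p) rest := by
        simp [geqLoop, hmq]
      rw [hred, ih (maps.insert q p)]
      constructor
      · rintro ⟨hmap, hfun⟩
        refine ⟨?_, ?_⟩
        · rintro p' q' hm o' ho'
          rcases List.mem_cons.1 hm with h | h
          · obtain ⟨h1, h2⟩ := Prod.mk.injEq .. ▸ h
            subst h1; subst h2
            rw [hmq] at ho'; injection ho'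
          · by_cases hq : q' = q
            · subst hq; rw [hmq] at ho'; injection ho'
            · refine hmap p' q' h o' ?_
              rw [PySem.Dict.get?_insert_of_ne maps p hq]
              exact ho'
        · rintro a b a' ha ha'
          rcases List.mem_cons.1 ha with h | h <;> rcases List.mem_cons.1 ha' with h' | h'
          · rw [Prod.mk.injEq] at h h'; omega
          · obtain ⟨h1, h2⟩ := Prod.mk.injEq .. ▸ h; subst h1; subst h2
            exact (hmap a' b h' a (PySem.Dict.get?_insert_self _ _ _)).symm
          · obtain ⟨h1, h2⟩ := Prod.mk.injEq .. ▸ h'; subst h1; subst h2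
            exact hmap a b h a' (PySem.Dict.get?_insert_self _ _ _)
          · exact hfun a b a' h h'
      · rintro ⟨hmap, hfun⟩
        refine ⟨?_, fun a b a' ha ha' =>
          hfun a b a' (List.mem_cons_of_mem _ ha) (List.mem_cons_of_mem _ ha')⟩
        rintro p' q' hm o' ho'
        by_cases hq : q' = q
        · subst hq
          rw [PySem.Dict.get?_insert_self] at ho'
          injection ho' with ho'
          rw [← ho']
          exact hfun p' q' p (List.mem_cons_of_mem _ hm) List.mem_cons_self
        · rw [PySem.Dict.get?_insert_of_ne maps p hq] at ho'
          exact hmap p' q' (List.mem_cons_of_mem _ hm) o' ho'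

-- PySem.Set.ofList has the same length as Mathlib's dedup (both nodup, same members).
theorem length_ofList_pairs (l : List (Int × Int)) :
    (PySem.Set.ofList l).length = l.toFinset.card := by
  rw [List.card_toFinset]
  exact List.Perm.length_eq
    ((List.perm_ext_iff_of_nodup (PySem.Set.nodup_ofList l) l.nodup_dedup).2
      (fun a => by rw [PySem.Set.mem_ofList, List.mem_dedup]))

theorem length_ofList_ints (l : List Int) :
    (PySem.Set.ofList l).length = l.toFinset.card := by
  rw [List.card_toFinset]
  exact List.Perm.length_eq
    ((List.perm_ext_iff_of_nodup (PySem.Set.nodup_ofList l) l.nodup_dedup).2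
      (fun a => by rw [PySem.Set.mem_ofList, List.mem_dedup]))

theorem toFinset_map_fst (l : List (Int × Int)) :
    (l.map Prod.fst).toFinset = l.toFinset.image Prod.fst := by
  ext a; simp

-- B's cardinality test says exactly that the zipped pairs are functional.
theorem card_eq_iff_func (L : List (Int × Int)) :
    (L.toFinset.card = (L.map Prod.fst).toFinset.card) ↔
      (∀ a b b', (a, b) ∈ L → (a, b') ∈ L → b = b') := by
  rw [toFinset_map_fst, eq_comm, Finset.card_image_iff]
  constructor
  · intro hinj a b b' hb hb'
    have := hinj (x₁ := (a, b)) (by simpa using hb) (x₂ := (a, b')) (by simpa using hb') rfl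
    exact (Prod.mk.injEq .. ▸ this).2
  · rintro hfun ⟨a, b⟩ ha ⟨a', b'⟩ ha' (h : a = a')
    subst h
    have hb : (a, b) ∈ L := by simpa using ha
    have hb' : (a, b') ∈ L := by simpa using ha'
    have : b = b' := hfun a b b' hb hb'
    simp [this]

theorem zip_mem_swap (P Q : List Int) (p q : Int) :
    (q, p) ∈ Q.zip P ↔ (p, q) ∈ P.zip Q := by
  rw [← List.zip_swap P Q, List.mem_map]
  constructor
  · rintro ⟨⟨x, y⟩, hm, h⟩
    obtain ⟨h1, h2⟩ := Prod.mk.injEq .. ▸ h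
    subst h1; subst h2; exact hm
  · intro h; exact ⟨(p, q), h, rfl⟩

-- ===== VERDICT (by name: the statement is the Claim_ definition above) =====
theorem geq_spec : Claim_equal_geq := by
  intro P Q _ hpre
  have hlen : P.length = Q.length := hpre
  unfold Spec_geq geq geq_alt
  rw [if_pos hlen, if_pos hlen]
  rw [Bool.eq_iff_iff, geqLoop_eq_true_iff, decide_eq_true_iff]
  rw [length_ofList_pairs, length_ofList_ints]
  have hQ : (Q.zip P).map Prod.fst = Q := List.map_fst_zip (le_of_eq hlen.symm)
  have hiff := card_eq_iff_func (Q.zip P)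
  rw [hQ] at hiff
  constructor
  · rintro ⟨_, hfun⟩
    rw [hiff]
    intro a b b' hb hb'
    exact hfun b a b' ((zip_mem_swap P Q b a).1 hb) ((zip_mem_swap P Q b' a).1 hb')
  · intro hcard
    rw [hiff] at hcard
    refine ⟨fun p q hm o ho => by simp [PySem.Dict.get?_empty] at ho, ?_⟩
    intro p q p' hm hm'
    exact hcard q p p' ((zip_mem_swap P Q p q).2 hm) ((zip_mem_swap P Q p' q).2 hm')
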